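-- pv_equiv track=rewrite | github.com/Misskesite/Leetcode | 473matchStick.py | matchSquare
-- ===== SOURCE A (Python) =====
-- def matchSquare(nums):
--     if not nums or len(nums) < 4:
--         return False
--     s = sum(nums)
--     div = s//4
--     if s % 4 != 0:
--         return False
--
--     nums.sort(reverse = True)
--
--
--     sides = [0]*4
--
--     def dfs(i):
--         if i == len(nums):
--             return True
--         for j in range(4): #四条边对称，从第一条边放，如果成功就返回
--             if sides[j] + nums[i] <= div:
--                 #需要去重 剪枝 如果两个sums值相同，那么把数字放在两个桶效果一样, 如果上一个放入失败，回溯到原始值sums[j-1]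
--                 if j > 0 and sides[j] == sides[j-1]: #加剪枝，速度提高更快
--                     continue
--                 sides[j] += nums[i]
--                 if dfs(i+1):
--                     return True
--                 sides[j] -= nums[i]
--         return False
--
--     return dfs(0)
-- ===== SOURCE B (Python) =====
-- def matchSquare(nums):
--     if len(nums) < 4:
--         return False
--     s = sum(nums)
--     if s % 4 != 0:
--         return False
--     div = s // 4
--     nums.sort(reverse=True)
--     states = {(0, 0, 0, 0)}
--     for x in nums:
--         nxt = set()
--         for a, b, c, d in states:
--             if a + x <= div:
--                 nxt.add((a + x, b, c, d))
--             if b + x <= div and b != a: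
--                 nxt.add((a, b + x, c, d))
--             if c + x <= div and c != b:
--                 nxt.add((a, b, c + x, d))
--             if d + x <= div and d != c:
--                 nxt.add((a, b, c, d + x))
--         if not nxt:
--             return False
--         states = nxt
--     return True
-- ===== Notes on version B (the rewrite author's own statement) =====
-- stated objective: alternative
-- what changed: Replaced the depth-first recursive backtracking over a mutable 4-bucket array by an iterative breadth-first dynamic program that folds over the sticks maintaining a deduplicated frontier set of (side0,side1,side2,side3) partial-sum states under the same transition rule.
import Mathlib
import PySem

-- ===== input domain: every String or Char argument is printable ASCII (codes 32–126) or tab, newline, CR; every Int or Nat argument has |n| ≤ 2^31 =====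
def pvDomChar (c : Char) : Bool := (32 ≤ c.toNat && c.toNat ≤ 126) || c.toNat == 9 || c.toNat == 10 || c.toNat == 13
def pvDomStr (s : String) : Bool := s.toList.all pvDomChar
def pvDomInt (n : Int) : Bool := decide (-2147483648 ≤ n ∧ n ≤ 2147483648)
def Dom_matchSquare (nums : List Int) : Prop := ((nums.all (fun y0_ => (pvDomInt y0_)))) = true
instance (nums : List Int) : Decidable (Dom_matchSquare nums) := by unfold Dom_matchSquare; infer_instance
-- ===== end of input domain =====

-- B replaces A's depth-first backtracking by a breadth-first frontier-set DP over the same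
-- transition rule (objective: alternative algorithm; return values proved equal on all inputs).
-- Both Pythons sort `nums` in place (the same mutation); the equivalence proved is about the return value.

-- ===== PORT A =====
-- A's `sides` list of length 4 is carried as the four accumulators s0..s3; the `for j in range(4)`
-- loop over the literal range is unrolled into its four iterations in order, with `||`
-- short-circuiting = the early `return True`, and the `continue` prune = the `≠` conjunct.
def dfsA (div : Int) : List Int → Int → Int → Int → Int → Bool
  | [], _, _, _, _ => true
  | x :: rest, s0, s1, s2, s3 =>
    (if s0 + x ≤ div then dfsA div rest (s0 + x) s1 s2 s3 else false) ||
    (if s1 + x ≤ div ∧ s1 ≠ s0 then dfsA div rest s0 (s1 + x) s2 s3 else false) ||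
    (if s2 + x ≤ div ∧ s2 ≠ s1 then dfsA div rest s0 s1 (s2 + x) s3 else false) ||
    (if s3 + x ≤ div ∧ s3 ≠ s2 then dfsA div rest s0 s1 s2 (s3 + x) else false)

def matchSquare (nums : List Int) : Bool :=
  if nums.isEmpty || decide (nums.length < 4) then false
  else
    let s := nums.sum
    let div := PySem.Int.floordiv s 4
    if PySem.Int.mod s 4 ≠ 0 then false
    else
      dfsA div (PySem.List.sorted nums (fun x => x) true) 0 0 0 0

-- ===== PORT B =====
-- the body of B's inner `for a, b, c, d in states` loop: add each admissible successor state
-- `if cond: nxt.add(u)` — one guarded insertion into the frontier set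
def addIf (cond : Prop) [Decidable cond] (s : PySem.Set (Int × Int × Int × Int))
    (u : Int × Int × Int × Int) : PySem.Set (Int × Int × Int × Int) :=
  if cond then PySem.Set.add s u else s

def stepB (div x : Int) (acc : PySem.Set (Int × Int × Int × Int))
    (t : Int × Int × Int × Int) : PySem.Set (Int × Int × Int × Int) :=
  match t with
  | (a, b, c, d) =>
    addIf (d + x ≤ div ∧ d ≠ c)
      (addIf (c + x ≤ div ∧ c ≠ b)
        (addIf (b + x ≤ div ∧ b ≠ a)
          (addIf (a + x ≤ div) acc (a + x, b, c, d))
          (a, b + x, c, d))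
        (a, b, c + x, d))
      (a, b, c, d + x)

-- B's `for x in nums` loop with the early `return False` on an empty frontier
def bfsB (div : Int) : List Int → PySem.Set (Int × Int × Int × Int) → Bool
  | [], _ => true
  | x :: rest, states =>
    let nxt := states.foldl (stepB div x) PySem.Set.empty
    if nxt.isEmpty then false else bfsB div rest nxt

def matchSquare_alt (nums : List Int) : Bool :=
  if decide (nums.length < 4) then false
  else if PySem.Int.mod nums.sum 4 ≠ 0 then false
  else
    let div := PySem.Int.floordiv nums.sum 4
    bfsB div (PySem.List.sorted nums (fun x => x) true)
      (PySem.Set.add PySem.Set.empty (0, 0, 0, 0))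

-- ===== PRECONDITION & SPEC =====
def Spec_matchSquare (nums : List Int) (out : Bool) : Prop := out = matchSquare_alt nums
instance (nums : List Int) (out : Bool) : Decidable (Spec_matchSquare nums out) := by unfold Spec_matchSquare; infer_instance

-- ===== CLAIM (what is proved, stated in full; the proofs are below) =====
def Claim_equal_matchSquare : Prop := ∀ (nums : List Int), Dom_matchSquare nums → Spec_matchSquare nums (matchSquare nums)

-- ===== LEMMAS AND PROOFS =====

-- the common successor relation of the two ports
def Succ (div x a b c d : Int) (t' : Int × Int × Int × Int) : Prop :=
  (a + x ≤ div ∧ t' = (a + x, b, c, d)) ∨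
  (b + x ≤ div ∧ b ≠ a ∧ t' = (a, b + x, c, d)) ∨
  (c + x ≤ div ∧ c ≠ b ∧ t' = (a, b, c + x, d)) ∨
  (d + x ≤ div ∧ d ≠ c ∧ t' = (a, b, c, d + x))

theorem mem_addIf (cond : Prop) [Decidable cond] (s : PySem.Set (Int × Int × Int × Int))
    (u t' : Int × Int × Int × Int) :
    t' ∈ addIf cond s u ↔ t' ∈ s ∨ (cond ∧ t' = u) := by
  unfold addIf
  split_ifs with hc <;> simp [PySem.Set.mem_add] <;> tauto

theorem mem_stepB (div x a b c d : Int) (acc : PySem.Set (Int × Int × Int × Int))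
    (t' : Int × Int × Int × Int) :
    t' ∈ stepB div x acc (a, b, c, d) ↔ t' ∈ acc ∨ Succ div x a b c d t' := by
  show t' ∈ addIf _ (addIf _ (addIf _ (addIf _ acc _) _) _) _ ↔ _
  simp only [mem_addIf, Succ]
  tauto

theorem mem_foldl_stepB (div x : Int) (S : List (Int × Int × Int × Int))
    (acc : PySem.Set (Int × Int × Int × Int)) (t' : Int × Int × Int × Int) :
    t' ∈ S.foldl (stepB div x) acc ↔
      t' ∈ acc ∨ ∃ t ∈ S, Succ div x t.1 t.2.1 t.2.2.1 t.2.2.2 t' := by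
  induction S generalizing acc with
  | nil => simp
  | cons h tl ih =>
    obtain ⟨a, b, c, d⟩ := h
    simp [List.foldl_cons, ih, mem_stepB]
    tauto

theorem dfsA_cons (div x : Int) (rest : List Int) (a b c d : Int) :
    dfsA div (x :: rest) a b c d = true ↔
      ∃ t', Succ div x a b c d t' ∧ dfsA div rest t'.1 t'.2.1 t'.2.2.1 t'.2.2.2 = true := by
  constructor
  · intro h
    simp only [dfsA, Bool.or_eq_true] at h
    rcases h with ((h | h) | h) | h <;> split_ifs at h with hc
    · exact ⟨(a + x, b, c, d), Or.inl ⟨hc, rfl⟩, h⟩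
    · exact ⟨(a, b + x, c, d), Or.inr (Or.inl ⟨hc.1, hc.2, rfl⟩), h⟩
    · exact ⟨(a, b, c + x, d), Or.inr (Or.inr (Or.inl ⟨hc.1, hc.2, rfl⟩)), h⟩
    · exact ⟨(a, b, c, d + x), Or.inr (Or.inr (Or.inr ⟨hc.1, hc.2, rfl⟩)), h⟩
  · rintro ⟨t', hs, hd⟩
    simp only [dfsA, Bool.or_eq_true]
    rcases hs with ⟨hc, rfl⟩ | ⟨hc1, hc2, rfl⟩ | ⟨hc1, hc2, rfl⟩ | ⟨hc1, hc2, rfl⟩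
    · exact Or.inl (Or.inl (Or.inl (by simp_all)))
    · exact Or.inl (Or.inl (Or.inr (by simp_all)))
    · exact Or.inl (Or.inr (by simp_all))
    · exact Or.inr (by simp_all)

theorem bfsB_eq_dfsA (div : Int) (l : List Int) :
    ∀ S : PySem.Set (Int × Int × Int × Int), S ≠ [] →
      (bfsB div l S = true ↔ ∃ t ∈ S, dfsA div l t.1 t.2.1 t.2.2.1 t.2.2.2 = true) := by
  induction l with
  | nil =>
    intro S hS
    constructor
    · intro _
      obtain ⟨t, ht⟩ := List.exists_mem_of_ne_nil S hS
      exact ⟨t, ht, by simp [dfsA]⟩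
    · intro _; rfl
  | cons x rest ih =>
    intro S hS
    have hmem : ∀ t', t' ∈ S.foldl (stepB div x) PySem.Set.empty ↔
        ∃ t ∈ S, Succ div x t.1 t.2.1 t.2.2.1 t.2.2.2 t' := by
      intro t'
      rw [mem_foldl_stepB]
      simp [PySem.Set.empty]
    have hrhs : (∃ t ∈ S, dfsA div (x :: rest) t.1 t.2.1 t.2.2.1 t.2.2.2 = true) ↔
        ∃ t' ∈ S.foldl (stepB div x) PySem.Set.empty,
          dfsA div rest t'.1 t'.2.1 t'.2.2.1 t'.2.2.2 = true := by
      constructor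
      · rintro ⟨t, htS, ht⟩
        rw [dfsA_cons] at ht
        obtain ⟨t', hs, hd⟩ := ht
        exact ⟨t', (hmem t').2 ⟨t, htS, hs⟩, hd⟩
      · rintro ⟨t', ht', hd⟩
        obtain ⟨t, htS, hs⟩ := (hmem t').1 ht'
        exact ⟨t, htS, (dfsA_cons div x rest _ _ _ _).2 ⟨t', hs, hd⟩⟩
    rw [show bfsB div (x :: rest) S =
        (if (S.foldl (stepB div x) PySem.Set.empty).isEmpty then false
         else bfsB div rest (S.foldl (stepB div x) PySem.Set.empty)) from rfl]
    rw [hrhs]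
    by_cases hnil : S.foldl (stepB div x) PySem.Set.empty = []
    · rw [hnil]
      simp
    · rw [if_neg (by simp only [List.isEmpty_iff]; exact hnil)]
      exact ih _ hnil

theorem dfs_eq_bfs (div : Int) (l : List Int) :
    dfsA div l 0 0 0 0 = bfsB div l [((0 : Int), (0 : Int), (0 : Int), (0 : Int))] := by
  have h := bfsB_eq_dfsA div l [((0 : Int), (0 : Int), (0 : Int), (0 : Int))] (by simp)
  cases hA : dfsA div l 0 0 0 0 with
  | false =>
    cases hB : bfsB div l [((0 : Int), (0 : Int), (0 : Int), (0 : Int))] with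
    | false => rfl
    | true =>
      exfalso
      obtain ⟨t, ht, hd⟩ := h.1 hB
      simp only [List.mem_singleton] at ht
      subst ht
      simp only at hd
      rw [hA] at hd
      exact absurd hd (by simp)
  | true =>
    exact (h.2 ⟨((0 : Int), (0 : Int), (0 : Int), (0 : Int)), by simp, by simpa using hA⟩).symm

-- ===== VERDICT (by name: the statement is the Claim_ definition above) =====
theorem matchSquare_spec : Claim_equal_matchSquare := by
  intro nums _
  unfold Spec_matchSquare matchSquare matchSquare_alt
  by_cases hlen : nums.length < 4
  · rw [show (nums.isEmpty || decide (nums.length < 4)) = true by simp [hlen],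
        decide_eq_true hlen, if_pos rfl, if_pos rfl]
  · have h1 : (nums.isEmpty || decide (nums.length < 4)) = false := by
      cases nums with
      | nil => exact absurd (by norm_num) hlen
      | cons h t =>
        simp only [List.isEmpty_cons, Bool.false_or, decide_eq_false_iff_not]
        exact hlen
    rw [h1, decide_eq_false hlen, if_neg Bool.false_ne_true, if_neg Bool.false_ne_true]
    show (if PySem.Int.mod nums.sum 4 ≠ 0 then false
          else dfsA (PySem.Int.floordiv nums.sum 4)
            (PySem.List.sorted nums (fun x => x) true) 0 0 0 0) =
         (if PySem.Int.mod nums.sum 4 ≠ 0 then false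
          else bfsB (PySem.Int.floordiv nums.sum 4)
            (PySem.List.sorted nums (fun x => x) true)
            (PySem.Set.add PySem.Set.empty (0, 0, 0, 0)))
    by_cases hmod : PySem.Int.mod nums.sum 4 ≠ 0
    · rw [if_pos hmod, if_pos hmod]
    · rw [if_neg hmod, if_neg hmod]
      exact dfs_eq_bfs _ _
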